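-- pv_equiv track=rewrite | github.com/kameelkhabaz/uchicago_classes | cmsc12100/team-tutorials-kameelkhabaz/tt3/cfpb.py | count_by_company_by_state
-- ===== SOURCE A (Python) =====
-- def count_by_company_by_state(complaints):
--     '''
--     Computes a dict of {company: {state: count, state: count}} for all states
--         and companies
--
--     Inputs:
--         complaints (list) A list of complaints, where each complaint is a
--             dictionary
--
--     Returns: (dict) with count per company per state
--     '''
--     by_comp_state = {}
--
--     for complaint in complaints:
--         company = complaint["Company"]
--         state = complaint["State"]
--         if company not in by_comp_state:
--             by_comp_state[company] = {state:0}
--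
--
--         by_comp_state[company][state] = by_comp_state[company].get(state,0) + 1
--     return by_comp_state
-- ===== SOURCE B (Python) =====
-- def count_by_company_by_state(complaints):
--     # Pass 1: flat counter keyed by (company, state).
--     flat = {}
--     for complaint in complaints:
--         key = (complaint["Company"], complaint["State"])
--         flat[key] = flat.get(key, 0) + 1
--     # Pass 2: regroup the flat counts into the nested dict.
--     out = {}
--     for (company, state), n in flat.items():
--         if company not in out:
--             out[company] = {}
--         out[company][state] = n
--     return out
-- ===== Notes on version B (the rewrite author's own statement) =====
-- stated objective: alternative
-- what changed: Replaces the single-pass nested-dict mutation with a two-pass decomposition: one pass builds a flat counter keyed by the (company, state) tuple, a second pass over the flat counter's items regroups the counts into the nested dict.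
import Mathlib
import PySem

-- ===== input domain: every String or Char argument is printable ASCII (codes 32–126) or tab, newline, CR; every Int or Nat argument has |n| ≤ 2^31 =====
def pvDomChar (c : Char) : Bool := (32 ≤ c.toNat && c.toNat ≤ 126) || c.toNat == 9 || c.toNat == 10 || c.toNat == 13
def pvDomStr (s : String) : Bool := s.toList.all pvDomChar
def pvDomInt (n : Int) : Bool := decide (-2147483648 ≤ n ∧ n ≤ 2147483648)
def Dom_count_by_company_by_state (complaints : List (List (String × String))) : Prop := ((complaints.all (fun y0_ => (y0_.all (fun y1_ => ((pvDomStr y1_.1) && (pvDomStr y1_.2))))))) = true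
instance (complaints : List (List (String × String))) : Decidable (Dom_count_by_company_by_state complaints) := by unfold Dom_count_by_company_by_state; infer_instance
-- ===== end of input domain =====

-- B replaces A's single-pass nested-dict mutation by a two-pass decomposition (flat (company,state) counter, then regroup); alternative structure, same cost.


-- ===== PORT A =====
-- for complaint in complaints: company = complaint["Company"]; state = complaint["State"];
--   if company not in d: d[company] = {state: 0}
--   d[company][state] = d[company].get(state, 0) + 1
-- (complaint["..."] is ported as Dict.getD with default "", total under Pre_ which guarantees both keys)
def count_by_company_by_state (complaints : List (List (String × String))) : List (String × List (String × Int)) :=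
  ((complaints.foldl (fun d c =>
      let cd := PySem.Dict.mk c
      let company := cd.getD "Company" ""
      let state := cd.getD "State" ""
      let d' := if d.contains company then d else d.insert company (PySem.Dict.mk [(state, 0)])
      d'.insert company ((d'.getD company PySem.Dict.empty).insert state
        ((d'.getD company PySem.Dict.empty).getD state 0 + 1)))
    PySem.Dict.empty).items).map (fun p => (p.1, p.2.items))

-- ===== PORT B =====
-- Pass 1: flat = {}; flat[(company, state)] = flat.get(key, 0) + 1   per complaint.
-- Pass 2: for ((company, state), n) in flat.items(): out.setdefault-style insert, out[company][state] = n.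
def count_by_company_by_state_alt (complaints : List (List (String × String))) : List (String × List (String × Int)) :=
  let flat := complaints.foldl (fun f c =>
      let cd := PySem.Dict.mk c
      let key := (cd.getD "Company" "", cd.getD "State" "")
      f.insert key (f.getD key 0 + 1)) PySem.Dict.empty
  let out := flat.items.foldl (fun o q =>
      let o' := if o.contains q.1.1 then o else o.insert q.1.1 PySem.Dict.empty
      o'.insert q.1.1 ((o'.getD q.1.1 PySem.Dict.empty).insert q.1.2 q.2)) PySem.Dict.empty
  out.items.map (fun p => (p.1, p.2.items))

-- ===== PRECONDITION & SPEC =====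
-- Pre_ excludes exactly the inputs where the Python A raises KeyError: a complaint missing key "Company" or "State".
def Pre_count_by_company_by_state (complaints : List (List (String × String))) : Prop :=
  complaints.all (fun c => (PySem.Dict.mk c).contains "Company" && (PySem.Dict.mk c).contains "State") = true
instance (complaints : List (List (String × String))) : Decidable (Pre_count_by_company_by_state complaints) := by unfold Pre_count_by_company_by_state; infer_instance
def pvWitness_count_by_company_by_state : (List (List (String × String))) :=
  [[("Company", "Acme"), ("State", "CA")], [("Company", "Acme"), ("State", "NY")], [("Company", "Acme"), ("State", "CA")]]
def Spec_count_by_company_by_state (complaints : List (List (String × String))) (out : List (String × List (String × Int))) : Prop := out = count_by_company_by_state_alt complaints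
instance (complaints : List (List (String × String))) (out : List (String × List (String × Int))) : Decidable (Spec_count_by_company_by_state complaints out) := by unfold Spec_count_by_company_by_state; infer_instance

-- ===== CLAIM (what is proved, stated in full; the proofs are below) =====
def Claim_equal_count_by_company_by_state : Prop := ∀ (complaints : List (List (String × String))), Dom_count_by_company_by_state complaints → Pre_count_by_company_by_state complaints → Spec_count_by_company_by_state complaints (count_by_company_by_state complaints)

-- ===== LEMMAS AND PROOFS =====

-- the (company, state) key a complaint contributes
def pvKeyOf (c : List (String × String)) : String × String :=
  ((PySem.Dict.mk c).getD "Company" "", (PySem.Dict.mk c).getD "State" "")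

-- A's loop body, on the extracted key pair
def pvNStep (d : PySem.Dict String (PySem.Dict String Int)) (p : String × String) :
    PySem.Dict String (PySem.Dict String Int) :=
  d.insert p.1 ((d.getD p.1 PySem.Dict.empty).insert p.2 ((d.getD p.1 PySem.Dict.empty).getD p.2 0 + 1))

-- B's second-pass loop body
def pvBStep (o : PySem.Dict String (PySem.Dict String Int)) (q : (String × String) × Int) :
    PySem.Dict String (PySem.Dict String Int) :=
  o.insert q.1.1 ((o.getD q.1.1 PySem.Dict.empty).insert q.1.2 q.2)

lemma pvBStep_eq_lam : pvBStep = (fun o q => o.insert q.1.1 ((o.getD q.1.1 PySem.Dict.empty).insert q.1.2 q.2)) := rfl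

-- A's seeding-then-overwrite step collapses to pvNStep
lemma pvStepA_eq (d : PySem.Dict String (PySem.Dict String Int)) (co st : String) :
    (let d' := if d.contains co then d else d.insert co (PySem.Dict.mk [(st, 0)])
     d'.insert co ((d'.getD co PySem.Dict.empty).insert st
        ((d'.getD co PySem.Dict.empty).getD st 0 + 1))) = pvNStep d (co, st) := by
  by_cases h : d.contains co = true
  · simp [h, pvNStep]
  · have h' : d.contains co = false := by simpa using h
    simp only [h', Bool.false_eq_true, if_false, pvNStep]
    rw [PySem.Dict.getD_insert_self, PySem.Dict.insert_insert_self,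
        PySem.Dict.getD_of_not_contains (h := h')]
    congr 1
    apply PySem.Dict.ext
    simp [PySem.Dict.items_insert, PySem.Dict.getD, PySem.Dict.get?, PySem.Dict.contains,
      PySem.Dict.empty]

-- B's seeding-then-insert step collapses to pvBStep
lemma pvStepB_eq (o : PySem.Dict String (PySem.Dict String Int)) (co st : String) (n : Int) :
    (let o' := if o.contains co then o else o.insert co PySem.Dict.empty
     o'.insert co ((o'.getD co PySem.Dict.empty).insert st n)) = pvBStep o ((co, st), n) := by
  by_cases h : o.contains co = true
  · simp [h, pvBStep]
  · have h' : o.contains co = false := by simpa using h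
    simp only [h', Bool.false_eq_true, if_false, pvBStep]
    rw [PySem.Dict.getD_insert_self, PySem.Dict.insert_insert_self,
        PySem.Dict.getD_of_not_contains (h := h')]

-- two inserts at different keys commute when the first key is already present
lemma pvInsert_comm {ν : Type} (d : PySem.Dict String ν) (k1 k2 : String) (v1 v2 : ν)
    (h1 : d.contains k1 = true) (hne : k2 ≠ k1) :
    (d.insert k1 v1).insert k2 v2 = (d.insert k2 v2).insert k1 v1 := by
  apply PySem.Dict.ext
  by_cases h2 : d.contains k2 = true
  · simp only [PySem.Dict.items_insert, PySem.Dict.contains_insert, h1, h2, Bool.or_true,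
      if_true, List.map_map]
    apply List.map_congr_left
    intro p _
    simp only [Function.comp]
    by_cases e1 : p.1 = k1 <;> by_cases e2 : p.1 = k2 <;>
      simp_all [beq_iff_eq, Ne.symm hne]
  · have h2' : d.contains k2 = false := by simpa using h2
    simp only [PySem.Dict.items_insert, PySem.Dict.contains_insert, h1, h2', beq_iff_eq, hne,
      Bool.or_true, Bool.or_false, if_true, if_false]
    simp [hne]

-- the inner dict of a pvBStep fold is the fold over the matching pairs
lemma pvInnerB (L : List ((String × String) × Int)) (D : PySem.Dict String (PySem.Dict String Int))
    (co : String) :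
    (L.foldl pvBStep D).getD co PySem.Dict.empty =
      (L.filter (fun q => q.1.1 == co)).foldl (fun inn q => inn.insert q.1.2 q.2)
        (D.getD co PySem.Dict.empty) := by
  induction L generalizing D with
  | nil => simp
  | cons q L ih =>
    simp only [List.foldl_cons, List.filter_cons]
    by_cases e : q.1.1 = co
    · subst e
      simp only [beq_self_eq_true, if_true, List.foldl_cons, ih]
      congr 1
      simp [pvBStep, PySem.Dict.getD_insert_self]
    · have : (q.1.1 == co) = false := by simp [e]
      simp only [this, Bool.false_eq_true, if_false, ih]
      congr 1
      simp [pvBStep, PySem.Dict.getD_insert_of_ne (hne := Ne.symm e)]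

-- the inner dict of a pvNStep fold
lemma pvInnerA (l : List (String × String)) (D : PySem.Dict String (PySem.Dict String Int))
    (co : String) :
    (l.foldl pvNStep D).getD co PySem.Dict.empty =
      (l.filter (fun p => p.1 == co)).foldl (fun inn p => inn.insert p.2 (inn.getD p.2 0 + 1))
        (D.getD co PySem.Dict.empty) := by
  induction l generalizing D with
  | nil => simp
  | cons p l ih =>
    simp only [List.foldl_cons, List.filter_cons]
    by_cases e : p.1 = co
    · subst e
      simp only [beq_self_eq_true, if_true, List.foldl_cons, ih]
      congr 1
      simp [pvNStep, PySem.Dict.getD_insert_self]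
    · have : (p.1 == co) = false := by simp [e]
      simp only [this, Bool.false_eq_true, if_false, ih]
      congr 1
      simp [pvNStep, PySem.Dict.getD_insert_of_ne (hne := Ne.symm e)]

-- count invariant for A's fold: the nested value at (co, st) is the count of that pair
lemma pvCountInv (l : List (String × String)) (co st : String) :
    ((l.foldl pvNStep PySem.Dict.empty).getD co PySem.Dict.empty).getD st 0 =
      (l.count (co, st) : Int) := by
  rw [pvInnerA]
  rw [← List.foldl_map (f := fun (p : String × String) => p.2)
        (g := fun (inn : PySem.Dict String Int) s => inn.insert s (inn.getD s 0 + 1))]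
  rw [PySem.Dict.getD_empty]
  rw [PySem.Dict.getD_foldl_insert_add_one]
  rw [PySem.Dict.getD_empty]
  simp only [zero_add]
  norm_cast
  induction l with
  | nil => simp
  | cons p l ih =>
    simp only [List.filter_cons, List.count_cons]
    by_cases e : p.1 = co
    · by_cases e2 : p.2 = st
      · simp [e, e2, ih, Prod.ext_iff]
      · simp [e, e2, ih, Prod.ext_iff]
    · simp [e, ih, Prod.ext_iff]

-- the outer key of every entry of L is a key of the refold
lemma pvContainsOuter (L : List ((String × String) × Int)) (q0 : (String × String) × Int)
    (h : q0 ∈ L) : (L.foldl pvBStep PySem.Dict.empty).contains q0.1.1 = true := by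
  rw [PySem.Dict.contains_iff_mem_keys, pvBStep_eq_lam,
      PySem.Dict.keys_foldl_insert_key L (fun q => q.1.1)
        (fun o q => (o.getD q.1.1 PySem.Dict.empty).insert q.1.2 q.2) PySem.Dict.empty]
  rw [show (PySem.Dict.empty : PySem.Dict String (PySem.Dict String Int)).keys = [] from rfl,
      PySem.Set.update_nil_left, PySem.Set.mem_ofList]
  exact List.mem_map_of_mem h

-- the inner key of every entry of L is a key of its inner dict in the refold
lemma pvContainsInner (L : List ((String × String) × Int)) (co st : String) (c : Int)
    (h : ((co, st), c) ∈ L) :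
    ((L.foldl pvBStep PySem.Dict.empty).getD co PySem.Dict.empty).contains st = true := by
  rw [pvInnerB, PySem.Dict.contains_iff_mem_keys,
      PySem.Dict.keys_foldl_insert_key (L.filter (fun q => q.1.1 == co)) (fun q => q.1.2)
        (fun inn q => q.2) (PySem.Dict.empty.getD co PySem.Dict.empty)]
  rw [show ((PySem.Dict.empty : PySem.Dict String (PySem.Dict String Int)).getD co PySem.Dict.empty).keys = [] from rfl,
      PySem.Set.update_nil_left, PySem.Set.mem_ofList]
  have : ((co, st), c) ∈ L.filter (fun q => q.1.1 == co) := by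
    simp [List.mem_filter, h]
  exact List.mem_map_of_mem this

-- bumping one flat count and refolding = one in-place nested update on the refold
lemma pvBump (L : List ((String × String) × Int)) (co st : String) (c : Int)
    (hmem : ((co, st), c) ∈ L) (hnd : (L.map (·.1)).Nodup) :
    ((L.map (fun q => if q.1 == (co, st) then ((co, st), c + 1) else q)).foldl pvBStep PySem.Dict.empty) =
      (L.foldl pvBStep PySem.Dict.empty).insert co
        (((L.foldl pvBStep PySem.Dict.empty).getD co PySem.Dict.empty).insert st (c + 1)) := by
  induction L using List.reverseRecOn with
  | nil => simp at hmem
  | append_singleton L q ih =>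
    have hnd' : (L.map (·.1)).Nodup ∧ q.1 ∉ L.map (·.1) := by
      rw [List.map_append] at hnd
      exact ⟨hnd.of_append_left, fun h => (List.disjoint_of_nodup_append hnd) h (by simp)⟩
    by_cases e : q.1 = (co, st)
    · -- q is the bumped entry; it is not in L
      have hnotL : ((co, st), c) ∉ L := by
        intro h
        exact hnd'.2 (e ▸ List.mem_map_of_mem (f := (·.1)) h)
      have hq : q = ((co, st), c) := by
        rcases List.mem_append.mp hmem with h | h
        · exact absurd h hnotL
        · rcases List.mem_singleton.mp h with rfl; rfl
      subst hq
      have hmapid : L.map (fun q => if q.1 == ((co, st) : String × String) then ((co, st), c + 1) else q) = L := by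
        rw [show L.map (fun q => if q.1 == ((co,st) : String × String) then ((co, st), c + 1) else q) = L.map id from
          List.map_congr_left (fun a ha => by
            have : (a.1 == ((co, st) : String × String)) = false := by
              simp only [beq_eq_false_iff_ne, ne_eq]
              intro h; exact hnd'.2 (h ▸ List.mem_map_of_mem (f := (·.1)) ha)
            simp [this]), List.map_id]
      rw [List.map_append, hmapid, List.map_singleton, List.foldl_append, List.foldl_append]
      simp only [beq_self_eq_true, if_true, List.foldl_cons, List.foldl_nil]
      simp only [pvBStep, PySem.Dict.getD_insert_self, PySem.Dict.insert_insert_self]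
    · -- q untouched, the bumped entry is in L
      have hmemL : ((co, st), c) ∈ L := by
        rcases List.mem_append.mp hmem with h | h
        · exact h
        · rcases List.mem_singleton.mp h with rfl; simp at e
      have hq : (q.1 == ((co, st) : String × String)) = false := by simpa using e
      rw [List.map_append, List.map_singleton, hq]
      simp only [Bool.false_eq_true, if_false]
      rw [List.foldl_append, List.foldl_append]
      simp only [List.foldl_cons, List.foldl_nil]
      rw [ih hmemL hnd'.1]
      set D := L.foldl pvBStep PySem.Dict.empty with hD
      have hDco : D.contains co = true := pvContainsOuter L _ hmemL
      have hIst : (D.getD co PySem.Dict.empty).contains st = true := pvContainsInner L co st c hmemL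
      obtain ⟨⟨co', st'⟩, n⟩ := q
      by_cases hco : co' = co
      · subst hco
        have hst : st' ≠ st := by intro h; exact e (by simp [h])
        simp only [pvBStep, PySem.Dict.getD_insert_self, PySem.Dict.insert_insert_self]
        rw [pvInsert_comm _ st st' _ _ hIst hst]
      · simp only [pvBStep]
        rw [PySem.Dict.getD_insert_of_ne (hne := hco),
            PySem.Dict.getD_insert_of_ne (hne := fun h => hco h.symm)]
        exact pvInsert_comm D co co' _ _ hDco hco

-- main: the nested one-pass count equals the regrouped flat counter
lemma pvMain (l : List (String × String)) :
    l.foldl pvNStep PySem.Dict.empty =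
      ((PySem.Dict.counter l).items).foldl pvBStep PySem.Dict.empty := by
  induction l using List.reverseRecOn with
  | nil => rfl
  | append_singleton l p ih =>
    obtain ⟨co, st⟩ := p
    rw [List.foldl_append, List.foldl_cons, List.foldl_nil,
        PySem.Dict.counter_append_singleton]
    rw [show (PySem.Dict.counter l).modify (co, st) 0 (fun x => x + 1)
          = (PySem.Dict.counter l).insert (co, st) ((PySem.Dict.counter l).getD (co, st) 0 + 1) from rfl]
    rw [PySem.Dict.getD_counter]
    by_cases hp : (co, st) ∈ l
    · have hcont : (PySem.Dict.counter l).contains (co, st) = true := by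
        rw [PySem.Dict.contains_counter]
        exact List.elem_eq_true_of_mem hp
      rw [PySem.Dict.items_insert_of_contains _ ((l.count (co, st) : Int) + 1) hcont]
      rw [pvBump _ co st ((l.count (co, st) : Int))
            (by rw [PySem.Dict.items_counter]
                exact List.mem_map_of_mem ((PySem.Set.mem_ofList _ _).mpr hp))
            (PySem.Dict.nodup_keys_counter l)]
      rw [← ih]
      have hcnt := pvCountInv l co st
      simp only [pvNStep]
      rw [hcnt]
    · have hcont : (PySem.Dict.counter l).contains (co, st) = false := by
        rw [PySem.Dict.contains_counter]
        simpa using hp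
      rw [PySem.Dict.items_insert_of_not_contains _ _ hcont]
      rw [List.foldl_append, List.foldl_cons, List.foldl_nil, ← ih]
      have hcnt := pvCountInv l co st
      simp only [pvNStep, pvBStep, hcnt]

-- ===== VERDICT (by name: the statement is the Claim_ definition above) =====
theorem count_by_company_by_state_spec : Claim_equal_count_by_company_by_state := by
  intro complaints _ _
  unfold Spec_count_by_company_by_state count_by_company_by_state count_by_company_by_state_alt
  have hA : (fun (d : PySem.Dict String (PySem.Dict String Int)) (c : List (String × String)) =>
      let cd := PySem.Dict.mk c
      let company := cd.getD "Company" ""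
      let state := cd.getD "State" ""
      let d' := if d.contains company then d else d.insert company (PySem.Dict.mk [(state, 0)])
      d'.insert company ((d'.getD company PySem.Dict.empty).insert state
        ((d'.getD company PySem.Dict.empty).getD state 0 + 1)))
      = fun d c => pvNStep d (pvKeyOf c) :=
    funext fun d => funext fun c => pvStepA_eq d _ _
  have hB : (fun (o : PySem.Dict String (PySem.Dict String Int)) (q : (String × String) × Int) =>
      let o' := if o.contains q.1.1 then o else o.insert q.1.1 PySem.Dict.empty
      o'.insert q.1.1 ((o'.getD q.1.1 PySem.Dict.empty).insert q.1.2 q.2))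
      = pvBStep :=
    funext fun o => funext fun q => pvStepB_eq o q.1.1 q.1.2 q.2
  have hF : (fun (f : PySem.Dict (String × String) Int) (c : List (String × String)) =>
      let cd := PySem.Dict.mk c
      let key := (cd.getD "Company" "", cd.getD "State" "")
      f.insert key (f.getD key 0 + 1))
      = fun f c => f.insert (pvKeyOf c) (f.getD (pvKeyOf c) 0 + 1) := rfl
  rw [hA, hB, hF]
  rw [← List.foldl_map (f := pvKeyOf) (g := pvNStep),
      ← List.foldl_map (f := pvKeyOf)
        (g := fun (f : PySem.Dict (String × String) Int) k => f.insert k (f.getD k 0 + 1))]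
  rw [PySem.Dict.foldl_insert_getD_add_one_eq_counter]
  rw [pvMain]
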